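-- pv_equiv track=rewrite | github.com/skeletor-js/redstring | backend/analysis/similarity.py | same_weapon_category
-- ===== SOURCE A (Python) =====
-- from typing import Dict, List, Optional, Tuple
--
-- def same_weapon_category(code1: Optional[int], code2: Optional[int]) -> bool:
--     """Check if two weapon codes are in the same category.
--
--     Weapon categories based on MAP data dictionary:
--     - Firearms: 11 (Firearm type unknown), 12 (Handgun), 13 (Rifle),
--                 14 (Shotgun), 15 (Other gun)
--     - Sharp: 20 (Knife/cutting instrument)
--     - Blunt: 30 (Blunt object)
--     - Personal: 40 (Personal weapons - hands, fists, feet)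
--     - Asphyxiation: 80 (Strangulation), 85 (Asphyxiation)
--
--     Args:
--         code1: First weapon code
--         code2: Second weapon code
--
--     Returns:
--         True if weapons are in the same category
--     """
--     if code1 is None or code2 is None:
--         return False
--
--     categories = {
--         "firearms": {11, 12, 13, 14, 15},
--         "sharp": {20},
--         "blunt": {30},
--         "personal": {40},
--         "asphyxiation": {80, 85},
--         "fire": {60},
--         "poison": {70},
--         "explosives": {65},
--         "narcotics": {75},
--         "drowning": {90},
--         "other": {50, 55},
--     }
--
--     for category_codes in categories.values():
--         if code1 in category_codes and code2 in category_codes: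
--             return True
--
--     return False
-- ===== SOURCE B (Python) =====
-- def same_weapon_category(code1, code2):
--     """Check if two weapon codes are in the same category (flat lookup table)."""
--     if code1 is None or code2 is None:
--         return False
--     category_of = {
--         11: "firearms", 12: "firearms", 13: "firearms", 14: "firearms", 15: "firearms",
--         20: "sharp",
--         30: "blunt",
--         40: "personal",
--         80: "asphyxiation", 85: "asphyxiation",
--         60: "fire",
--         70: "poison",
--         65: "explosives",
--         75: "narcotics",
--         90: "drowning",
--         50: "other", 55: "other",
--     }
--     cat1 = category_of.get(code1)
--     cat2 = category_of.get(code2)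
--     return cat1 is not None and cat1 == cat2
-- ===== Notes on version B (the rewrite author's own statement) =====
-- stated objective: idiomatic
-- what changed: Replaces the loop over category sets (membership scan per category) with a single flat code-to-category dict built once; two direct lookups and one equality comparison, no loop.
import Mathlib
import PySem

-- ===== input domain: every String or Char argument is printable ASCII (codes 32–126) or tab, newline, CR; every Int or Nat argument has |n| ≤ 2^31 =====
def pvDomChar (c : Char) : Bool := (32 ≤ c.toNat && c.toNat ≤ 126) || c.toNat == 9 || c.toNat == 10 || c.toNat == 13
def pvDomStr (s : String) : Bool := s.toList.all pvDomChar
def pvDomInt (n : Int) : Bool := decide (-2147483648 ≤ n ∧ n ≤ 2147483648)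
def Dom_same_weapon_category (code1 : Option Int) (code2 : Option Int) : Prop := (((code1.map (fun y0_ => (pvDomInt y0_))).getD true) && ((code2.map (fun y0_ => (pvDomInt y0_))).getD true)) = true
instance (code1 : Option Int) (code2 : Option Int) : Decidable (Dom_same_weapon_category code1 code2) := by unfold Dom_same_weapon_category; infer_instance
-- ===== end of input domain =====

-- B replaces A's loop over category sets by one flat code→category dict and two direct lookups (idiomatic).

-- ===== PORT A =====
-- the dict literal `categories` of A (category name → set of codes)
def pvCategories : PySem.Dict String (PySem.Set Int) :=
  PySem.Dict.ofList
    [ ("firearms", PySem.Set.ofList [11, 12, 13, 14, 15])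
    , ("sharp", PySem.Set.ofList [20])
    , ("blunt", PySem.Set.ofList [30])
    , ("personal", PySem.Set.ofList [40])
    , ("asphyxiation", PySem.Set.ofList [80, 85])
    , ("fire", PySem.Set.ofList [60])
    , ("poison", PySem.Set.ofList [70])
    , ("explosives", PySem.Set.ofList [65])
    , ("narcotics", PySem.Set.ofList [75])
    , ("drowning", PySem.Set.ofList [90])
    , ("other", PySem.Set.ofList [50, 55]) ]

-- `for category_codes in categories.values(): if code1 in … and code2 in …: return True`, then `return False`
def pvCatLoop (c1 c2 : Int) : List (PySem.Set Int) → Bool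
  | [] => false
  | s :: rest =>
      if PySem.Set.contains s c1 && PySem.Set.contains s c2 then true
      else pvCatLoop c1 c2 rest

def same_weapon_category (code1 : Option Int) (code2 : Option Int) : Bool :=
  match code1, code2 with
  | none, _ => false
  | _, none => false
  | some c1, some c2 => pvCatLoop c1 c2 (PySem.Dict.values pvCategories)

-- ===== PORT B =====
-- the flat dict literal `category_of` of B (code → category name)
def pvCategoryOf : PySem.Dict Int String :=
  PySem.Dict.ofList
    [ (11, "firearms"), (12, "firearms"), (13, "firearms"), (14, "firearms"), (15, "firearms")
    , (20, "sharp")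
    , (30, "blunt")
    , (40, "personal")
    , (80, "asphyxiation"), (85, "asphyxiation")
    , (60, "fire")
    , (70, "poison")
    , (65, "explosives")
    , (75, "narcotics")
    , (90, "drowning")
    , (50, "other"), (55, "other") ]

def same_weapon_category_alt (code1 : Option Int) (code2 : Option Int) : Bool :=
  match code1, code2 with
  | none, _ => false
  | _, none => false
  | some c1, some c2 =>
      match PySem.Dict.get? pvCategoryOf c1, PySem.Dict.get? pvCategoryOf c2 with
      | some cat1, some cat2 => cat1 == cat2
      | _, _ => false

-- ===== PRECONDITION & SPEC =====
def Spec_same_weapon_category (code1 : Option Int) (code2 : Option Int) (out : Bool) : Prop := out = same_weapon_category_alt code1 code2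
instance (code1 : Option Int) (code2 : Option Int) (out : Bool) : Decidable (Spec_same_weapon_category code1 code2 out) := by unfold Spec_same_weapon_category; infer_instance

-- ===== CLAIM (what is proved, stated in full; the proofs are below) =====
def Claim_equal_same_weapon_category : Prop := ∀ (code1 : Option Int) (code2 : Option Int), Dom_same_weapon_category code1 code2 → Spec_same_weapon_category code1 code2 (same_weapon_category code1 code2)

-- ===== LEMMAS AND PROOFS =====

-- the codes appearing in either table
def pvKnownCodes : List Int := [11, 12, 13, 14, 15, 20, 30, 40, 50, 55, 60, 65, 70, 75, 80, 85, 90]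

-- both dict literals, evaluated to their underlying key-value lists (keys are unique, so ofList keeps them as written)
theorem pvCategories_eval :
    pvCategories = PySem.Dict.mk
      [ ("firearms", [11, 12, 13, 14, 15]), ("sharp", [20]), ("blunt", [30]), ("personal", [40])
      , ("asphyxiation", [80, 85]), ("fire", [60]), ("poison", [70]), ("explosives", [65])
      , ("narcotics", [75]), ("drowning", [90]), ("other", [50, 55]) ] := by decide

theorem pvCategoryOf_eval :
    pvCategoryOf = PySem.Dict.mk
      [ (11, "firearms"), (12, "firearms"), (13, "firearms"), (14, "firearms"), (15, "firearms")
      , (20, "sharp"), (30, "blunt"), (40, "personal"), (80, "asphyxiation"), (85, "asphyxiation")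
      , (60, "fire"), (70, "poison"), (65, "explosives"), (75, "narcotics"), (90, "drowning")
      , (50, "other"), (55, "other") ] := by decide

-- an unknown code is in no category set, so A's loop returns false
theorem pvCatLoop_unknown_left (c1 c2 : Int) (h : c1 ∉ pvKnownCodes) :
    pvCatLoop c1 c2 (PySem.Dict.values pvCategories) = false := by
  simp only [pvKnownCodes, List.mem_cons, List.not_mem_nil, or_false, not_or] at h
  obtain ⟨h1, h2, h3, h4, h5, h6, h7, h8, h9, h10, h11, h12, h13, h14, h15, h16, h17⟩ := h
  rw [pvCategories_eval]
  simp [pvCatLoop, PySem.Set.contains,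
        h1, h2, h3, h4, h5, h6, h7, h8, h9, h10, h11, h12, h13, h14, h15, h16, h17]

theorem pvCatLoop_unknown_right (c1 c2 : Int) (h : c2 ∉ pvKnownCodes) :
    pvCatLoop c1 c2 (PySem.Dict.values pvCategories) = false := by
  simp only [pvKnownCodes, List.mem_cons, List.not_mem_nil, or_false, not_or] at h
  obtain ⟨h1, h2, h3, h4, h5, h6, h7, h8, h9, h10, h11, h12, h13, h14, h15, h16, h17⟩ := h
  rw [pvCategories_eval]
  simp [pvCatLoop, PySem.Set.contains,
        h1, h2, h3, h4, h5, h6, h7, h8, h9, h10, h11, h12, h13, h14, h15, h16, h17]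

-- an unknown code is absent from B's flat dict
theorem pvGet?_unknown (c : Int) (h : c ∉ pvKnownCodes) :
    PySem.Dict.get? pvCategoryOf c = none := by
  simp only [pvKnownCodes, List.mem_cons, List.not_mem_nil, or_false, not_or] at h
  obtain ⟨h1, h2, h3, h4, h5, h6, h7, h8, h9, h10, h11, h12, h13, h14, h15, h16, h17⟩ := h
  rw [pvCategoryOf_eval]
  simp [PySem.Dict.get?, Ne.symm h1, Ne.symm h2, Ne.symm h3, Ne.symm h4, Ne.symm h5, Ne.symm h6,
        Ne.symm h7, Ne.symm h8, Ne.symm h9, Ne.symm h10, Ne.symm h11, Ne.symm h12, Ne.symm h13,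
        Ne.symm h14, Ne.symm h15, Ne.symm h16, Ne.symm h17]

-- ===== VERDICT (by name: the statement is the Claim_ definition above) =====
theorem same_weapon_category_spec : Claim_equal_same_weapon_category := by
  intro code1 code2 _
  unfold Spec_same_weapon_category
  match code1, code2 with
  | none, _ => rfl
  | some _, none => rfl
  | some c1, some c2 =>
    show pvCatLoop c1 c2 (PySem.Dict.values pvCategories) =
      (match PySem.Dict.get? pvCategoryOf c1, PySem.Dict.get? pvCategoryOf c2 with
       | some cat1, some cat2 => cat1 == cat2
       | _, _ => false)
    by_cases h1 : c1 ∈ pvKnownCodes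
    · by_cases h2 : c2 ∈ pvKnownCodes
      · fin_cases h1 <;> fin_cases h2 <;> decide
      · rw [pvCatLoop_unknown_right c1 c2 h2, pvGet?_unknown c2 h2]
        cases PySem.Dict.get? pvCategoryOf c1 <;> rfl
    · rw [pvCatLoop_unknown_left c1 c2 h1, pvGet?_unknown c1 h1]
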